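-- pv_equiv track=rewrite | github.com/calimero-network/ai-code-reviewer | src/ai_reviewer/docs/analyzer.py | _has_removed_top_level_dir
-- ===== SOURCE A (Python) =====
-- def _has_removed_top_level_dir(
--     changed_paths_with_status: dict[str, str],
--     existing_repo_paths: set[str],
-- ) -> bool:
--     """True if a top-level dir appears only with 'removed' status in the diff
--     AND is not known to still exist in the repo via *existing_repo_paths*.
--     """
--     known_dirs: set[str] = set()
--     for p in existing_repo_paths:
--         stripped = p.rstrip("/")
--         if "/" not in stripped:
--             known_dirs.add(stripped)
--
--     dir_statuses: dict[str, set[str]] = {}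
--     for path, status in changed_paths_with_status.items():
--         parts = path.split("/")
--         if len(parts) < 2:
--             continue
--         dir_statuses.setdefault(parts[0], set()).add(status)
--
--     return any(
--         statuses == {"removed"} and top_dir not in known_dirs
--         for top_dir, statuses in dir_statuses.items()
--     )
-- ===== SOURCE B (Python) =====
-- def _has_removed_top_level_dir(
--     changed_paths_with_status: dict[str, str],
--     existing_repo_paths: set[str],
-- ) -> bool:
--     """True if a top-level dir appears only with 'removed' status in the diff
--     AND is not known to still exist in the repo via *existing_repo_paths*.
--
--     Direct quantifier formulation: a witness entry is a nested path with
--     'removed' status whose top-level dir has no nested entry with another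
--     status and is not a known top-level dir.  No accumulator dict or sets
--     are built; each candidate is checked by scanning the inputs directly.
--     """
--     items = list(changed_paths_with_status.items())
--
--     def is_known(d):
--         return any(
--             q.rstrip("/") == d and "/" not in q.rstrip("/")
--             for q in existing_repo_paths
--         )
--
--     def only_removed(d):
--         return all(
--             s == "removed"
--             for q, s in items
--             if len(q.split("/")) >= 2 and q.split("/")[0] == d
--         )
--
--     return any(
--         len(p.split("/")) >= 2
--         and s == "removed"
--         and only_removed(p.split("/")[0])
--         and not is_known(p.split("/")[0])
--         for p, s in items
--     )
-- ===== Notes on version B (the rewrite author's own statement) =====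
-- stated objective: alternative
-- what changed: Drops A's accumulator state (the set of known dirs and the dict of per-dir status sets) entirely: B is a direct quantifier formulation that, for each changed entry, decides by rescanning the inputs whether it witnesses a removed-only unknown top-level dir (nested scans instead of one indexing pass).
import Mathlib
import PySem

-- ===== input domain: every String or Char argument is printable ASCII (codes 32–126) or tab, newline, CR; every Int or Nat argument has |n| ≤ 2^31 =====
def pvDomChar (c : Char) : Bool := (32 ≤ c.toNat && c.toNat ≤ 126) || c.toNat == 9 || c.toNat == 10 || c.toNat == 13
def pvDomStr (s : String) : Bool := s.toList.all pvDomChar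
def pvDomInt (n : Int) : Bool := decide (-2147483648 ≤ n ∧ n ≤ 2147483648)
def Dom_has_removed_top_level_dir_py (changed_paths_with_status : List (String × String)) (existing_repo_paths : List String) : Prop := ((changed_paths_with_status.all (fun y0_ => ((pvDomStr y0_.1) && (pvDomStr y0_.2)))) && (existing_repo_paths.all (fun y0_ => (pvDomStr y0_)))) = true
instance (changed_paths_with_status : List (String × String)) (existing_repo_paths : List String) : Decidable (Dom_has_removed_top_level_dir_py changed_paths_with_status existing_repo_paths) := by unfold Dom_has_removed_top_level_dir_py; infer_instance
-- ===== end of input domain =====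

-- B drops A's accumulator state (known-dirs set, dict of per-dir status sets) for a direct
-- quantifier formulation that rescans the inputs per candidate entry; objective: alternative.

-- ===== PORT A =====

-- exact port of Python's s.rstrip("/") (drop trailing '/' characters); shared by both ports
def pyRstripSlash (s : String) : String :=
  String.ofList ((s.toList.reverse.dropWhile (fun c => c == '/')).reverse)

-- parts = path.split("/"): sep is the nonempty literal "/", so split? is never none;
-- split on a nonempty sep always yields a nonempty list, so parts[0] never raises (headD "")
def pyParts (p : String) : List String := (PySem.Str.split? p "/").getD []

-- known_dirs loop body of A
def aKnownStep (kd : PySem.Set String) (p : String) : PySem.Set String :=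
  let stripped := pyRstripSlash p
  if !(PySem.Str.isIn "/" stripped) then PySem.Set.add kd stripped else kd

-- dir_statuses loop body of A: skip if len(parts) < 2;
-- dir_statuses.setdefault(parts[0], set()).add(status)  =  modify parts[0] ∅ (·.add status)
def aDirStep (d : PySem.Dict String (PySem.Set String)) (pr : String × String) :
    PySem.Dict String (PySem.Set String) :=
  let parts := pyParts pr.1
  if parts.length < 2 then d
  else d.modify (parts.headD "") PySem.Set.empty (fun s => PySem.Set.add s pr.2)

def has_removed_top_level_dir_py (changed_paths_with_status : List (String × String)) (existing_repo_paths : List String) : Bool :=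
  let known_dirs : PySem.Set String := existing_repo_paths.foldl aKnownStep PySem.Set.empty
  let dir_statuses : PySem.Dict String (PySem.Set String) :=
    changed_paths_with_status.foldl aDirStep PySem.Dict.empty
  dir_statuses.items.any (fun it =>
    PySem.Set.equal it.2 (PySem.Set.ofList ["removed"]) && !(PySem.Set.contains known_dirs it.1))

-- ===== PORT B =====

-- is_known(d): any(q.rstrip("/") == d and "/" not in q.rstrip("/") for q in existing_repo_paths)
def bIsKnown (existing_repo_paths : List String) (d : String) : Bool :=
  existing_repo_paths.any (fun q =>
    (pyRstripSlash q == d) && !(PySem.Str.isIn "/" (pyRstripSlash q)))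

-- only_removed(d): all(s == "removed" for q, s in items if len(q.split("/")) >= 2 and q.split("/")[0] == d)
def bOnlyRemoved (items : List (String × String)) (d : String) : Bool :=
  (items.filter (fun qr => decide (2 ≤ (pyParts qr.1).length) && ((pyParts qr.1).headD "" == d))).all
    (fun qr => qr.2 == "removed")

def has_removed_top_level_dir_py_alt (changed_paths_with_status : List (String × String)) (existing_repo_paths : List String) : Bool :=
  changed_paths_with_status.any (fun pr =>
    decide (2 ≤ (pyParts pr.1).length) && (pr.2 == "removed")
      && bOnlyRemoved changed_paths_with_status ((pyParts pr.1).headD "")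
      && !(bIsKnown existing_repo_paths ((pyParts pr.1).headD "")))

-- ===== PRECONDITION & SPEC =====
def Spec_has_removed_top_level_dir_py (changed_paths_with_status : List (String × String)) (existing_repo_paths : List String) (out : Bool) : Prop := out = has_removed_top_level_dir_py_alt changed_paths_with_status existing_repo_paths
instance (changed_paths_with_status : List (String × String)) (existing_repo_paths : List String) (out : Bool) : Decidable (Spec_has_removed_top_level_dir_py changed_paths_with_status existing_repo_paths out) := by unfold Spec_has_removed_top_level_dir_py; infer_instance

-- ===== CLAIM (what is proved, stated in full; the proofs are below) =====
def Claim_equal_has_removed_top_level_dir_py : Prop := ∀ (changed_paths_with_status : List (String × String)) (existing_repo_paths : List String), Dom_has_removed_top_level_dir_py changed_paths_with_status existing_repo_paths → Spec_has_removed_top_level_dir_py changed_paths_with_status existing_repo_paths (has_removed_top_level_dir_py changed_paths_with_status existing_repo_paths)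

-- ===== LEMMAS AND PROOFS =====

-- membership in A's known_dirs set ↔ a witnessing repo path exists
theorem known_mem (l : List String) (kd : PySem.Set String) (t : String) :
    t ∈ l.foldl aKnownStep kd ↔
      t ∈ kd ∨ ∃ q ∈ l, PySem.Str.isIn "/" (pyRstripSlash q) = false ∧ pyRstripSlash q = t := by
  induction l generalizing kd with
  | nil => simp
  | cons q rest ih =>
    simp only [List.foldl_cons, ih, List.mem_cons]
    by_cases h : PySem.Str.isIn "/" (pyRstripSlash q) = false
    · simp only [aKnownStep, h, Bool.not_false, if_pos, PySem.Set.mem_add]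
      constructor
      · rintro ((hm | rfl) | ⟨q', hq', hc⟩)
        · exact Or.inl hm
        · exact Or.inr ⟨q, Or.inl rfl, h, rfl⟩
        · exact Or.inr ⟨q', Or.inr hq', hc⟩
      · rintro (hm | ⟨q', (rfl | hq'), hc, rfl⟩)
        · exact Or.inl (Or.inl hm)
        · exact Or.inl (Or.inr rfl)
        · exact Or.inr ⟨q', hq', hc, rfl⟩
    · have h' : (!(PySem.Str.isIn "/" (pyRstripSlash q))) = false := by
        simp at h ⊢; exact h
      simp only [aKnownStep, h', Bool.false_eq_true, if_false]
      constructor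
      · rintro (hm | ⟨q', hq', hc⟩)
        · exact Or.inl hm
        · exact Or.inr ⟨q', Or.inr hq', hc⟩
      · rintro (hm | ⟨q', (rfl | hq'), hc, rfl⟩)
        · exact Or.inl hm
        · exact absurd hc h
        · exact Or.inr ⟨q', hq', hc, rfl⟩

-- keys of A's dict stay nodup and its value sets stay nodup along the fold
theorem dir_wf (l : List (String × String)) (d : PySem.Dict String (PySem.Set String))
    (hk : d.keys.Nodup) (hv : ∀ t, (d.getD t PySem.Set.empty).Nodup) :
    (l.foldl aDirStep d).keys.Nodup ∧
    ∀ t, ((l.foldl aDirStep d).getD t PySem.Set.empty).Nodup := by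
  induction l generalizing d with
  | nil => exact ⟨hk, hv⟩
  | cons pr rest ih =>
    simp only [List.foldl_cons]
    by_cases hlen : (pyParts pr.1).length < 2
    · have ha : aDirStep d pr = d := by simp only [aDirStep]; rw [if_pos hlen]
      rw [ha]; exact ih d hk hv
    · have ha : aDirStep d pr =
          d.modify ((pyParts pr.1).headD "") PySem.Set.empty (fun s => PySem.Set.add s pr.2) := by
        simp only [aDirStep]; rw [if_neg hlen]
      rw [ha]
      refine ih _ ?_ ?_
      · rw [PySem.Dict.keys_modify]
        exact PySem.Dict.nodup_keys_insert _ _ _ hk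
      · intro t
        by_cases h : t = (pyParts pr.1).headD ""
        · subst h
          rw [PySem.Dict.getD_modify_self]
          exact PySem.Set.nodup_add _ _ (hv _)
        · rw [PySem.Dict.getD_modify_of_ne _ _ _ h]
          exact hv t

-- membership in a value set of A's dict ↔ a witnessing changed entry exists
theorem dir_mem (l : List (String × String)) (d : PySem.Dict String (PySem.Set String))
    (t s : String) :
    s ∈ (l.foldl aDirStep d).getD t PySem.Set.empty ↔
      s ∈ d.getD t PySem.Set.empty ∨
        ∃ pr ∈ l, 2 ≤ (pyParts pr.1).length ∧ (pyParts pr.1).headD "" = t ∧ pr.2 = s := by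
  induction l generalizing d with
  | nil => simp
  | cons pr rest ih =>
    simp only [List.foldl_cons, ih, List.mem_cons]
    by_cases hlen : (pyParts pr.1).length < 2
    · have ha : aDirStep d pr = d := by simp only [aDirStep]; rw [if_pos hlen]
      rw [ha]
      constructor
      · rintro (hm | ⟨pr', hpr', hc⟩)
        · exact Or.inl hm
        · exact Or.inr ⟨pr', Or.inr hpr', hc⟩
      · rintro (hm | ⟨pr', (rfl | hpr'), h2, hc⟩)
        · exact Or.inl hm
        · omega
        · exact Or.inr ⟨pr', hpr', h2, hc⟩
    · have ha : aDirStep d pr =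
          d.modify ((pyParts pr.1).headD "") PySem.Set.empty (fun s => PySem.Set.add s pr.2) := by
        simp only [aDirStep]; rw [if_neg hlen]
      rw [ha]
      by_cases h : t = (pyParts pr.1).headD ""
      · subst h
        rw [PySem.Dict.getD_modify_self, PySem.Set.mem_add]
        constructor
        · rintro ((hm | rfl) | ⟨pr', hpr', hc⟩)
          · exact Or.inl hm
          · exact Or.inr ⟨pr, Or.inl rfl, by omega, rfl, rfl⟩
          · exact Or.inr ⟨pr', Or.inr hpr', hc⟩
        · rintro (hm | ⟨pr', (rfl | hpr'), _, _, rfl⟩)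
          · exact Or.inl (Or.inl hm)
          · exact Or.inl (Or.inr rfl)
          · exact Or.inr ⟨pr', hpr', by assumption, by assumption, rfl⟩
      · rw [PySem.Dict.getD_modify_of_ne _ _ _ h]
        constructor
        · rintro (hm | ⟨pr', hpr', hc⟩)
          · exact Or.inl hm
          · exact Or.inr ⟨pr', Or.inr hpr', hc⟩
        · rintro (hm | ⟨pr', (rfl | hpr'), _, ht, rfl⟩)
          · exact Or.inl hm
          · exact absurd ht.symm h
          · exact Or.inr ⟨pr', hpr', by assumption, by assumption, rfl⟩

-- ===== VERDICT (by name: the statement is the Claim_ definition above) =====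
theorem has_removed_top_level_dir_py_spec : Claim_equal_has_removed_top_level_dir_py := by
  intro changed existing _
  unfold Spec_has_removed_top_level_dir_py
  unfold has_removed_top_level_dir_py has_removed_top_level_dir_py_alt
  simp only
  set known := existing.foldl aKnownStep PySem.Set.empty with hkn
  set d := changed.foldl aDirStep PySem.Dict.empty with hd
  obtain ⟨hk, hv⟩ :=
    dir_wf changed PySem.Dict.empty
      (by simp [PySem.Dict.keys_empty])
      (by intro t; simp [PySem.Dict.getD_empty, PySem.Set.empty_eq])
  have hmemD : ∀ t s, s ∈ d.getD t PySem.Set.empty ↔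
      ∃ pr ∈ changed, 2 ≤ (pyParts pr.1).length ∧ (pyParts pr.1).headD "" = t ∧ pr.2 = s := by
    intro t s
    rw [hd, dir_mem]
    simp [PySem.Dict.getD_empty, PySem.Set.empty_eq]
  have hknownIff : ∀ t, PySem.Set.contains known t = bIsKnown existing t := by
    intro t
    rw [Bool.eq_iff_iff, PySem.Set.contains_iff, hkn, known_mem, bIsKnown, List.any_eq_true]
    constructor
    · rintro (hm | ⟨q, hq, hc, rfl⟩)
      · simp [PySem.Set.empty_eq] at hm
      · exact ⟨q, hq, by rw [Bool.and_eq_true, hc]; exact ⟨by simp, rfl⟩⟩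
    · rintro ⟨q, hq, hb⟩
      simp only [Bool.and_eq_true, beq_iff_eq, Bool.not_eq_true'] at hb
      exact Or.inr ⟨q, hq, hb.2, hb.1⟩
  rw [Bool.eq_iff_iff, List.any_eq_true, List.any_eq_true]
  constructor
  · rintro ⟨⟨k, v⟩, hmem, hp⟩
    simp only [Bool.and_eq_true, Bool.not_eq_true'] at hp
    obtain ⟨heq, hnk⟩ := hp
    have hgv : d.getD k PySem.Set.empty = v := PySem.Dict.getD_of_mem_items _ hmem hk _
    have hx : ∀ x, x ∈ v ↔ x = "removed" := by
      intro x
      rw [(PySem.Set.equal_iff v _).mp heq x, PySem.Set.mem_ofList]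
      simp
    -- "removed" ∈ v gives a witness entry pr
    obtain ⟨pr, hpr, h2, htop, hst⟩ :=
      (hmemD k "removed").mp (by rw [hgv]; exact (hx "removed").mpr rfl)
    refine ⟨pr, hpr, ?_⟩
    simp only [Bool.and_eq_true, decide_eq_true_eq, beq_iff_eq, Bool.not_eq_true']
    refine ⟨⟨⟨h2, hst⟩, ?_⟩, ?_⟩
    · rw [bOnlyRemoved, List.all_eq_true]
      intro qr hqr
      rw [List.mem_filter] at hqr
      obtain ⟨hqmem, hqc⟩ := hqr
      simp only [Bool.and_eq_true, decide_eq_true_eq, beq_iff_eq] at hqc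
      have : qr.2 ∈ d.getD k PySem.Set.empty := by
        refine (hmemD k qr.2).mpr ⟨qr, hqmem, hqc.1, ?_, rfl⟩
        rw [hqc.2, htop]
      rw [hgv] at this
      simp [(hx qr.2).mp this]
    · rw [htop, ← hknownIff]
      simpa using hnk
  · rintro ⟨pr, hpr, hb⟩
    simp only [Bool.and_eq_true, decide_eq_true_eq, beq_iff_eq, Bool.not_eq_true'] at hb
    obtain ⟨⟨⟨h2, hst⟩, honly⟩, hnk⟩ := hb
    set t := (pyParts pr.1).headD "" with ht
    have hrm : "removed" ∈ d.getD t PySem.Set.empty :=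
      (hmemD t "removed").mpr ⟨pr, hpr, h2, rfl, hst⟩
    have hall : ∀ s ∈ d.getD t PySem.Set.empty, s = "removed" := by
      intro s hs
      obtain ⟨qr, hqmem, hq2, hqtop, rfl⟩ := (hmemD t s).mp hs
      rw [bOnlyRemoved, List.all_eq_true] at honly
      have := honly qr (by
        rw [List.mem_filter]
        refine ⟨hqmem, ?_⟩
        simp only [Bool.and_eq_true, decide_eq_true_eq, beq_iff_eq]
        exact ⟨hq2, hqtop⟩)
      simpa using this
    have hc : d.contains t = true := by
      by_contra hc
      rw [PySem.Dict.getD_of_not_contains _ _ (by simpa using hc)] at hrm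
      simp [PySem.Set.empty_eq] at hrm
    have hsome : ∃ v, d.get? t = some v := by
      have := PySem.Dict.contains_eq_isSome_get? (d := d) (k := t)
      rw [hc] at this
      exact Option.isSome_iff_exists.mp this.symm
    obtain ⟨v, hv'⟩ := hsome
    have hmem : (t, v) ∈ d.items := PySem.Dict.mem_items_of_get?_eq_some _ hv'
    have hgv : d.getD t PySem.Set.empty = v := PySem.Dict.getD_of_get?_eq_some _ _ hv'
    refine ⟨(t, v), hmem, ?_⟩
    simp only [Bool.and_eq_true, Bool.not_eq_true']
    constructor
    · rw [PySem.Set.equal_iff]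
      intro x
      rw [PySem.Set.mem_ofList]
      simp only [List.mem_singleton]
      constructor
      · intro hx
        exact hall x (by rwa [hgv])
      · rintro rfl
        rwa [← hgv]
    · rw [hknownIff]
      simpa using hnk
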